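-- pv_equiv track=rewrite | github.com/bbbart/advent_of_code | 2024/day_19/answer.py | p1
-- ===== SOURCE A (Python) =====
-- def p1(data: list[str], is_sample: bool):
--     towels = tuple(data[0].split(", "))
--     patterns = set(data[2:])
--
--     # recursive function
--     def pattern_possible(pattern, towels):
--         if pattern in towels:
--             return True
--
--         for i in range(1, len(pattern)):
--             if pattern[:i] not in towels:
--                 continue
--             if pattern_possible(pattern[i:], towels):
--                 break
--         else:
--             return False
--         return True
--
--     return sum(pattern_possible(pattern, towels) for pattern in patterns)
-- ===== SOURCE B (Python) =====
-- def p1(data: list[str], is_sample: bool):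
--     towels = data[0].split(", ")
--     towel_set = set(towels)
--     lengths = {len(t) for t in towels if t}
--     count = 0
--     for pattern in set(data[2:]):
--         n = len(pattern)
--         if n == 0:
--             if pattern in towel_set:
--                 count += 1
--             continue
--         # dp[j] = pattern[:j] is a concatenation of (nonempty) towels
--         dp = [False] * (n + 1)
--         dp[0] = True
--         for j in range(1, n + 1):
--             dp[j] = any(
--                 L <= j and dp[j - L] and pattern[j - L:j] in towel_set
--                 for L in lengths
--             )
--         if dp[n]:
--             count += 1
--     return count
-- ===== Notes on version B (the rewrite author's own statement) =====
-- stated objective: alternative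
-- what changed: Replaces A's top-down recursion over all prefix split points (exponential worst case, no memoization) with an iterative bottom-up DP over pattern prefixes (dp[j] = prefix of length j is buildable) using a towel set and the distinct towel lengths; on the benchmark's easy inputs A's early-exit recursion is not slower, so no speed is claimed.
import Mathlib
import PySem

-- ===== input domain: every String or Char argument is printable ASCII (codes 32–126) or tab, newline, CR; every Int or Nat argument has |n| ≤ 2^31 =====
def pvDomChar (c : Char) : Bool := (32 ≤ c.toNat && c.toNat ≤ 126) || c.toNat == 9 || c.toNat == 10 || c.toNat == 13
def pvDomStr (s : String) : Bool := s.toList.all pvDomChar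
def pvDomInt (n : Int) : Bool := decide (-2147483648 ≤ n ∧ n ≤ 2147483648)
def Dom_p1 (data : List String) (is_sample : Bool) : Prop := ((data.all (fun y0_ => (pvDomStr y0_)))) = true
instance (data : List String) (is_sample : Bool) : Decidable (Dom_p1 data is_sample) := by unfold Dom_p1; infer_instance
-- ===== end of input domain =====

-- B replaces A's top-down recursion over prefix split points by a bottom-up DP over pattern
-- prefixes; strings are ported as their character lists (string ops here are charwise-exact).

-- ===== PORT A =====
-- recursive pattern_possible: pattern in towels, else try each split point i in range(1, len)
def possA (T : List (List Char)) (p : List Char) : Bool :=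
  if p ∈ T then true
  else
    (PySem.List.pyRange 1 (p.length : Int) 1).attach.any (fun i =>
      if p.take i.1.toNat ∈ T then possA T (p.drop i.1.toNat) else false)
termination_by p.length
decreasing_by
  rename_i hi
  have h := (PySem.List.mem_pyRange_one).mp i.2
  simp only [List.length_drop]
  omega

def p1 (data : List String) (is_sample : Bool) : Int :=
  match data with
  | [] => 0  -- Python raises IndexError on data[0]; excluded by Pre_p1
  | d0 :: _ =>
    let towels := PySem.Chars.splitOn d0.toList (", ".toList)
    let patterns := PySem.Set.ofList ((data.drop 2).map String.toList)
    -- sum over the set of booleans; order-independent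
    patterns.foldl (fun acc p => acc + (if possA towels p then (1 : Int) else 0)) 0

-- ===== PORT B =====
-- dp row j: any distinct towel length L with L ≤ j, dp[j - L] true, and pattern[j-L:j] in towel_set
-- (pattern[j-L:j] is ported as take L of drop (j-L); Python only evaluates it under the guard L ≤ j,
--  where the slice has exactly length L)
def dpRow (lengths : List Nat) (S : List (List Char)) (p : List Char) (dp : List Bool) (j : Nat) : Bool :=
  lengths.any (fun L =>
    decide (L ≤ j) && dp.getD (j - L) false && PySem.Set.contains S ((p.drop (j - L)).take L))

-- dp[0..j] built left to right, dp[0] = true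
def dpBuild (lengths : List Nat) (S : List (List Char)) (p : List Char) : Nat → List Bool
  | 0 => [true]
  | j + 1 =>
    let d := dpBuild lengths S p j
    d ++ [dpRow lengths S p d (j + 1)]

def possB (lengths : List Nat) (S : List (List Char)) (p : List Char) : Bool :=
  if p.length = 0 then PySem.Set.contains S p
  else (dpBuild lengths S p p.length).getD p.length false

def p1_alt (data : List String) (is_sample : Bool) : Int :=
  match data with
  | [] => 0  -- B also raises IndexError here; excluded by Pre_p1
  | d0 :: _ =>
    let towels := PySem.Chars.splitOn d0.toList (", ".toList)
    let towelSet := PySem.Set.ofList towels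
    let lengths : List Nat := PySem.Set.ofList ((towels.filter (fun t => !t.isEmpty)).map List.length)
    (PySem.Set.ofList ((data.drop 2).map String.toList)).foldl
      (fun acc p => if possB lengths towelSet p then acc + 1 else acc) 0

-- ===== PRECONDITION & SPEC =====
-- Pre_ excludes only empty data, where A raises IndexError on data[0]
def Pre_p1 (data : List String) (is_sample : Bool) : Prop := data ≠ []
instance (data : List String) (is_sample : Bool) : Decidable (Pre_p1 data is_sample) := by
  unfold Pre_p1; infer_instance
def pvWitness_p1 : List String × Bool := (["r, g, rg", "", "rgr", "gg"], true)

def Spec_p1 (data : List String) (is_sample : Bool) (out : Int) : Prop := out = p1_alt data is_sample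
instance (data : List String) (is_sample : Bool) (out : Int) : Decidable (Spec_p1 data is_sample out) := by unfold Spec_p1; infer_instance

-- ===== CLAIM (what is proved, stated in full; the proofs are below) =====
def Claim_equal_p1 : Prop := ∀ (data : List String) (is_sample : Bool), Dom_p1 data is_sample → Pre_p1 data is_sample → Spec_p1 data is_sample (p1 data is_sample)

-- ===== LEMMAS AND PROOFS =====

-- q is a concatenation of (zero or more) nonempty towels
def Build (T : List (List Char)) (q : List Char) : Prop :=
  ∃ L : List (List Char), (∀ t ∈ L, t ∈ T ∧ t ≠ []) ∧ L.flatten = q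

lemma build_snoc_iff (T : List (List Char)) (q : List Char) (hq : q ≠ []) :
    Build T q ↔ ∃ t ∈ T, t ≠ [] ∧ ∃ r, Build T r ∧ q = r ++ t := by
  constructor
  · rintro ⟨L, hL, rfl⟩
    rcases List.eq_nil_or_concat L with rfl | ⟨L', t, rfl⟩
    · exact absurd rfl hq
    · refine ⟨t, (hL t (by simp)).1, (hL t (by simp)).2, L'.flatten,
        ⟨L', fun s hs => hL s (by simp [hs]), rfl⟩, by simp⟩
  · rintro ⟨t, htT, htne, r, ⟨L', hL', rfl⟩, rfl⟩
    exact ⟨L' ++ [t], fun s hs => by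
      rcases List.mem_append.mp hs with h | h
      · exact hL' s h
      · simp at h; subst h; exact ⟨htT, htne⟩, by simp⟩

lemma possA_unfold (T : List (List Char)) (p : List Char) :
    possA T p = true ↔
      p ∈ T ∨ ∃ i : Nat, 1 ≤ i ∧ i < p.length ∧ p.take i ∈ T ∧ possA T (p.drop i) = true := by
  rw [possA]
  by_cases hT : p ∈ T
  · simp [hT]
  · simp only [hT, if_false, false_or, List.any_eq_true, List.mem_attach, true_and,
      Subtype.exists]
    constructor
    · rintro ⟨i, hi, hcond⟩
      have hm := (PySem.List.mem_pyRange_one).mp hi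
      refine ⟨i.toNat, by omega, by omega, ?_⟩
      split_ifs at hcond with h
      · exact ⟨h, hcond⟩
    · rintro ⟨i, h1, h2, hTi, hrec⟩
      refine ⟨(i : Int), (PySem.List.mem_pyRange_one).mpr ⟨by omega, by omega⟩, ?_⟩
      simp only [Int.toNat_natCast]
      simp [hTi, hrec]

lemma possA_iff_build (T : List (List Char)) :
    ∀ n (p : List Char), p.length ≤ n → p ≠ [] → (possA T p = true ↔ Build T p) := by
  intro n
  induction n with
  | zero => intro p hl hne; cases p <;> simp_all
  | succ n ih =>
    intro p hl hne
    rw [possA_unfold]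
    constructor
    · rintro (hT | ⟨i, h1, h2, hTi, hrec⟩)
      · exact ⟨[p], by simp [hT, hne], by simp⟩
      · have hdne : p.drop i ≠ [] := by
          intro h; have := congrArg List.length h; simp at this; omega
        have hdl : (p.drop i).length ≤ n := by rw [List.length_drop]; omega
        obtain ⟨L', hL', hf⟩ := (ih (p.drop i) hdl hdne).mp hrec
        have htne : p.take i ≠ [] := by
          have hti : (p.take i).length = i := by rw [List.length_take]; omega
          intro h; rw [h] at hti; simp at hti; omega
        refine ⟨p.take i :: L', ?_, by simp [hf]⟩
        intro s hs
        rcases List.mem_cons.mp hs with rfl | h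
        · exact ⟨hTi, htne⟩
        · exact hL' s h
    · rintro ⟨L, hL, rfl⟩
      rcases L with _ | ⟨t, L'⟩
      · exact absurd rfl hne
      · have htT := (hL t (by simp)).1
        have htne := (hL t (by simp)).2
        by_cases hr : L'.flatten = []
        · left; simpa [hr] using htT
        · right
          refine ⟨t.length, ?_, ?_, ?_, ?_⟩
          · have : t.length ≠ 0 := fun h => htne (List.eq_nil_of_length_eq_zero h)
            omega
          · simp only [List.flatten_cons, List.length_append]
            have : L'.flatten.length ≠ 0 := fun h => hr (List.eq_nil_of_length_eq_zero h)
            omega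
          · have hfc : (t :: L').flatten = t ++ L'.flatten := by simp
            rw [hfc, List.take_left]; exact htT
          · have hfc : (t :: L').flatten = t ++ L'.flatten := by simp
            have hd : (t :: L').flatten.drop t.length = L'.flatten := by
              simp [List.flatten_cons]
            rw [hd]
            have hll : L'.flatten.length ≤ n := by
              have := hl
              simp only [List.flatten_cons, List.length_append] at this
              have : t.length ≠ 0 := fun h => htne (List.eq_nil_of_length_eq_zero h)
              omega
            exact (ih L'.flatten hll hr).mpr ⟨L', fun s hs => hL s (by simp [hs]), rfl⟩

lemma build_take_succ_iff (T : List (List Char)) (p : List Char) (j : Nat)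
    (hj : j + 1 ≤ p.length) :
    Build T (p.take (j + 1)) ↔
      ∃ t ∈ T, 0 < t.length ∧ t.length ≤ j + 1 ∧ Build T (p.take (j + 1 - t.length)) ∧
        (p.drop (j + 1 - t.length)).take t.length = t := by
  have hql : (p.take (j + 1)).length = j + 1 := by rw [List.length_take]; omega
  have hqne : p.take (j + 1) ≠ [] := by
    intro h; rw [h] at hql; simp at hql
  rw [build_snoc_iff T _ hqne]
  constructor
  · rintro ⟨t, htT, htne, r, hr, heq⟩
    have hlen : r.length + t.length = j + 1 := by
      have := congrArg List.length heq; simp [hql] at this; omega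
    have htl : 0 < t.length := by
      cases t with
      | nil => exact absurd rfl htne
      | cons a l => simp
    refine ⟨t, htT, htl, by omega, ?_, ?_⟩
    · have hrq : r = (p.take (j + 1)).take (j + 1 - t.length) := by
        rw [heq, List.take_left' (by omega)]
      rw [hrq, List.take_take] at hr
      have : min (j + 1 - t.length) (j + 1) = j + 1 - t.length := by omega
      rwa [this] at hr
    · have htq : (p.take (j + 1)).drop (j + 1 - t.length) = t := by
        rw [heq]
        have : j + 1 - t.length = r.length := by omega
        rw [this, List.drop_left]
      rw [List.drop_take] at htq
      have : j + 1 - (j + 1 - t.length) = t.length := by omega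
      rwa [this] at htq
  · rintro ⟨t, htT, htl, hle, hbr, hteq⟩
    refine ⟨t, htT, ?_, p.take (j + 1 - t.length), hbr, ?_⟩
    · intro h; rw [h] at htl; simp at htl
    · conv_lhs => rw [show j + 1 = (j + 1 - t.length) + t.length by omega]
      rw [List.take_add, hteq]

lemma dpBuild_length (lengths : List Nat) (S : List (List Char)) (p : List Char) (j : Nat) :
    (dpBuild lengths S p j).length = j + 1 := by
  induction j with
  | zero => rfl
  | succ j ih => simp [dpBuild, ih]

lemma dpBuild_getD (T : List (List Char)) (lengths : List Nat) (S : List (List Char))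
    (p : List Char)
    (HS : ∀ x : List Char, x ∈ S ↔ x ∈ T)
    (HL : ∀ L : Nat, L ∈ lengths ↔ ∃ t ∈ T, t ≠ [] ∧ t.length = L) :
    ∀ j, j ≤ p.length → ∀ k, k ≤ j →
      ((dpBuild lengths S p j).getD k false = true ↔ Build T (p.take k)) := by
  intro j
  induction j with
  | zero =>
    intro _ k hk
    interval_cases k
    simp [dpBuild, List.getD]
    exact ⟨[], by simp, rfl⟩
  | succ j ih =>
    intro hj k hk
    have hdl : (dpBuild lengths S p j).length = j + 1 := dpBuild_length lengths S p j
    rcases Nat.lt_or_ge k (j + 1) with hlt | hge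
    · have : (dpBuild lengths S p (j + 1)).getD k false
          = (dpBuild lengths S p j).getD k false := by
        simp only [dpBuild, List.getD]
        rw [List.getElem?_append_left (by omega)]
      rw [this]
      exact ih (by omega) k (by omega)
    · have hk1 : k = j + 1 := by omega
      subst hk1
      have : (dpBuild lengths S p (j + 1)).getD (j + 1) false
          = dpRow lengths S p (dpBuild lengths S p j) (j + 1) := by
        simp only [dpBuild, List.getD]
        rw [List.getElem?_append_right (by omega)]
        simp [hdl]
      rw [this, build_take_succ_iff T p j (by omega)]
      simp only [dpRow, List.any_eq_true, Bool.and_eq_true, decide_eq_true_eq]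
      constructor
      · rintro ⟨L, hLmem, ⟨⟨hLle, hdp⟩, hin⟩⟩
        obtain ⟨t0, _, ht0ne, ht0len⟩ := (HL L).mp hLmem
        have hLpos : 0 < L := by
          cases t0 with
          | nil => exact absurd rfl ht0ne
          | cons a l => rw [← ht0len]; simp
        set sl := (p.drop (j + 1 - L)).take L with hsl
        have hslT : sl ∈ T := (HS sl).mp ((PySem.Set.contains_iff S sl).mp hin)
        have hsll : sl.length = L := by
          rw [hsl, List.length_take, List.length_drop]; omega
        refine ⟨sl, hslT, by omega, by omega, ?_, by rw [hsll]⟩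
        rw [hsll]
        exact (ih (by omega) (j + 1 - L) (by omega)).mp hdp
      · rintro ⟨t, htT, h1, h2, hb, h3⟩
        refine ⟨t.length, (HL t.length).mpr ⟨t, htT, by
            intro h; rw [h] at h1; simp at h1, rfl⟩, ⟨⟨h2, ?_⟩, ?_⟩⟩
        · exact (ih (by omega) (j + 1 - t.length) (by omega)).mpr hb
        · rw [h3]
          exact (PySem.Set.contains_iff S t).mpr ((HS t).mpr htT)

lemma possB_eq_possA (T : List (List Char)) (lengths : List Nat) (S : List (List Char))
    (p : List Char)
    (HS : ∀ x : List Char, x ∈ S ↔ x ∈ T)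
    (HL : ∀ L : Nat, L ∈ lengths ↔ ∃ t ∈ T, t ≠ [] ∧ t.length = L) :
    possB lengths S p = possA T p := by
  by_cases hp : p = []
  · subst hp
    rw [possB, possA]
    rw [PySem.List.pyRange_one_eq_nil (by simp)]
    by_cases hT : ([] : List Char) ∈ T <;>
      simp [hT, HS]
  · have hlen : p.length ≠ 0 := fun h => hp (List.eq_nil_of_length_eq_zero h)
    rw [Bool.eq_iff_iff]
    rw [possB, if_neg hlen]
    rw [dpBuild_getD T lengths S p HS HL p.length le_rfl p.length le_rfl, List.take_length]
    exact (possA_iff_build T p.length p le_rfl hp).symm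

lemma mem_lengths_iff (T : List (List Char)) (L : Nat) :
    L ∈ (PySem.Set.ofList ((T.filter (fun t => !t.isEmpty)).map List.length) : List Nat)
      ↔ ∃ t ∈ T, t ≠ [] ∧ t.length = L := by
  rw [PySem.Set.mem_ofList]
  simp only [List.mem_map, List.mem_filter]
  constructor
  · rintro ⟨t, ⟨htT, hne⟩, rfl⟩
    exact ⟨t, htT, by simpa [List.isEmpty_iff] using hne, rfl⟩
  · rintro ⟨t, htT, hne, rfl⟩
    exact ⟨t, ⟨htT, by simpa [List.isEmpty_iff] using hne⟩, rfl⟩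

-- ===== VERDICT (by name: the statement is the Claim_ definition above) =====
theorem p1_spec : Claim_equal_p1 := by
  intro data is_sample _ hpre
  unfold Spec_p1
  match data with
  | [] => exact absurd rfl hpre
  | d0 :: rest =>
    simp only [p1, p1_alt]
    apply PySem.List.foldl_congr_mem
    intro acc x _
    rw [← possB_eq_possA (PySem.Chars.splitOn d0.toList (", ".toList))
          _ _ x (fun y => PySem.Set.mem_ofList _ y) (mem_lengths_iff _)]
    split_ifs <;> omega
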